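-- pv_equiv track=rewrite | github.com/hemangandhi/derpspace | pythons/algorithms/einKlien.py | n_dims
-- ===== SOURCE A (Python) =====
-- def n_dims(dims, start, stop):
-- 	if dims == 1:
-- 		return list(map(lambda x: [x], range(start, stop)))
-- 	else:
-- 		p = n_dims(dims - 1, start, stop)
-- 		a = []
-- 		for i in range(start, stop):
-- 			a += [j + [i] for j in p]
-- 		return a
-- ===== SOURCE B (Python) =====
-- def n_dims(dims, start, stop):
--     p = [[x] for x in range(start, stop)]
--     for _ in range(dims - 1):
--         p = [j + [i] for i in range(start, stop) for j in p]
--     return p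
-- ===== Notes on version B (the rewrite author's own statement) =====
-- stated objective: simpler
-- what changed: Replaces the recursion on dims (with an inner accumulator loop) by an iterative bottom-up build: start from the one-dimensional layer and repeat a single flattening comprehension dims-1 times.
import Mathlib
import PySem

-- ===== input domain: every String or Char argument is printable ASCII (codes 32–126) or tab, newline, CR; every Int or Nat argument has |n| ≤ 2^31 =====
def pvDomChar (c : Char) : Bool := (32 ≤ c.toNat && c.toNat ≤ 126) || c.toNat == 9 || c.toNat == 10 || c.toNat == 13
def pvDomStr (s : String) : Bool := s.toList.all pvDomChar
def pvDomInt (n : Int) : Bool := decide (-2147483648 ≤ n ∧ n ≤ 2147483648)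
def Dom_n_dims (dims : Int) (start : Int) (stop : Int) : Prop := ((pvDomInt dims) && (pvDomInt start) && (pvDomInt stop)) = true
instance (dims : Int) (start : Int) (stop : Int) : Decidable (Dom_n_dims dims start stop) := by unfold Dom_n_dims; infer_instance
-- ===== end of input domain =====

-- B replaces A's recursion on dims by an iterative bottom-up build (simpler decomposition; return value only).

-- ===== PORT A =====
-- A recurses on dims; the recursion is transliterated with the fuel dims.toNat
-- (for dims ≤ 0 A never returns — RecursionError — so the fuel-0 value is never claimed; Pre_ excludes it).
def n_dimsGo : Nat → Int → Int → List (List Int)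
  | 0, _, _ => []
  | 1, s, t => (PySem.List.pyRange s t 1).map (fun x => [x])
  | (n+2), s, t =>
    let p := n_dimsGo (n+1) s t
    (PySem.List.pyRange s t 1).foldl (fun a i => a ++ p.map (fun j => j ++ [i])) []

def n_dims (dims : Int) (start : Int) (stop : Int) : List (List Int) :=
  n_dimsGo dims.toNat start stop

-- ===== PORT B =====
def n_dims_alt (dims : Int) (start : Int) (stop : Int) : List (List Int) :=
  (PySem.List.pyRange 0 (dims - 1) 1).foldl
    (fun p _ => (PySem.List.pyRange start stop 1).flatMap (fun i => p.map (fun j => j ++ [i])))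
    ((PySem.List.pyRange start stop 1).map (fun x => [x]))

-- ===== PRECONDITION & SPEC =====
-- Pre_ excludes dims ≤ 0, where A raises RecursionError (infinite recursion) and returns nothing.
def Pre_n_dims (dims : Int) (start : Int) (stop : Int) : Prop := 1 ≤ dims
instance (dims : Int) (start : Int) (stop : Int) : Decidable (Pre_n_dims dims start stop) := by unfold Pre_n_dims; infer_instance
def pvWitness_n_dims : Int × Int × Int := (2, 0, 2)

def Spec_n_dims (dims : Int) (start : Int) (stop : Int) (out : List (List Int)) : Prop := out = n_dims_alt dims start stop
instance (dims : Int) (start : Int) (stop : Int) (out : List (List Int)) : Decidable (Spec_n_dims dims start stop out) := by unfold Spec_n_dims; infer_instance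

-- ===== CLAIM (what is proved, stated in full; the proofs are below) =====
def Claim_equal_n_dims : Prop := ∀ (dims : Int) (start : Int) (stop : Int), Dom_n_dims dims start stop → Pre_n_dims dims start stop → Spec_n_dims dims start stop (n_dims dims start stop)

-- ===== LEMMAS AND PROOFS =====

-- the dims-th layer of A equals n iterations of B's step over B's initial layer
theorem n_dimsGo_eq_foldl (n : Nat) (s t : Int) :
    n_dimsGo (n + 1) s t =
      (PySem.List.pyRange 0 (n : Int) 1).foldl
        (fun p _ => (PySem.List.pyRange s t 1).flatMap (fun i => p.map (fun j => j ++ [i])))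
        ((PySem.List.pyRange s t 1).map (fun x => [x])) := by
  induction n with
  | zero => simp [n_dimsGo, PySem.List.pyRange_one_eq_nil]
  | succ n ih =>
    have hsplit : PySem.List.pyRange 0 ((n : Int) + 1) 1
        = PySem.List.pyRange 0 (n : Int) 1 ++ [(n : Int)] :=
      PySem.List.pyRange_one_succ_right (by positivity)
    show n_dimsGo (n + 2) s t = _
    rw [n_dimsGo]
    rw [PySem.List.foldl_append_eq_flatMap]
    push_cast [hsplit, List.foldl_append]
    simp [ih]

theorem n_dims_spec : Claim_equal_n_dims := by
  intro dims s t _ hpre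
  unfold Pre_n_dims at hpre
  unfold Spec_n_dims n_dims n_dims_alt
  have h1 : dims.toNat = (dims.toNat - 1) + 1 := by omega
  have h2 : dims - 1 = ((dims.toNat - 1 : Nat) : Int) := by omega
  rw [h1, h2, n_dimsGo_eq_foldl]

-- ===== VERDICT (by name: the statement is the Claim_ definition above) =====
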